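-- pv_equiv track=rewrite | github.com/starrycw/CAC-DyShielding | RingCAC_Alg/CAC_enum.py | ringFPFCAC_cw_check
-- ===== SOURCE A (Python) =====
-- def ringFPFCAC_cw_check(cw_tuple: tuple[int, ...]) -> bool:
--     '''
--     If the input codeword follows the ring-FPF-CAC rules. (FPF-CAC rules + addition restrictions).
--     :param cw_tuple:
--     :return:
--     '''
--     assert isinstance(cw_tuple, tuple)
--     is_sat = True
--     assert cw_tuple[0] in (0, 1)
--     assert cw_tuple[1] in (0, 1)
--     for idx_i in range(0, len(cw_tuple)):
--         assert cw_tuple[idx_i] in (0, 1)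
--         if (cw_tuple[idx_i - 2] == 0) and (cw_tuple[idx_i - 1] == 1) and (cw_tuple[idx_i] == 0):
--             is_sat = False
--         if (cw_tuple[idx_i - 2] == 1) and (cw_tuple[idx_i - 1] == 0) and (cw_tuple[idx_i] == 1):
--             is_sat = False
--     return is_sat
-- ===== SOURCE B (Python) =====
-- def ringFPFCAC_cw_check(cw_tuple: tuple[int, ...]) -> bool:
--     '''
--     Transition-table reformulation: a window 010/101 exists iff two cyclically
--     adjacent bit-transitions occur; build the cyclic transition list, then
--     check no two consecutive transitions.
--     '''
--     assert isinstance(cw_tuple, tuple)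
--     assert cw_tuple[0] in (0, 1)
--     assert cw_tuple[1] in (0, 1)
--     n = len(cw_tuple)
--     trans = []
--     for j in range(n):
--         assert cw_tuple[j] in (0, 1)
--         trans.append(cw_tuple[j - 1] != cw_tuple[j])
--     return not any(trans[j - 1] and trans[j] for j in range(n))
-- ===== Notes on version B (the rewrite author's own statement) =====
-- stated objective: alternative
-- what changed: Replaces the 3-element cyclic window scan (flag set to False on a 010/101 window) by building a cyclic transition table t[j] = (cw[j-1] != cw[j]) and returning whether no two cyclically adjacent transitions occur.
import Mathlib
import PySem

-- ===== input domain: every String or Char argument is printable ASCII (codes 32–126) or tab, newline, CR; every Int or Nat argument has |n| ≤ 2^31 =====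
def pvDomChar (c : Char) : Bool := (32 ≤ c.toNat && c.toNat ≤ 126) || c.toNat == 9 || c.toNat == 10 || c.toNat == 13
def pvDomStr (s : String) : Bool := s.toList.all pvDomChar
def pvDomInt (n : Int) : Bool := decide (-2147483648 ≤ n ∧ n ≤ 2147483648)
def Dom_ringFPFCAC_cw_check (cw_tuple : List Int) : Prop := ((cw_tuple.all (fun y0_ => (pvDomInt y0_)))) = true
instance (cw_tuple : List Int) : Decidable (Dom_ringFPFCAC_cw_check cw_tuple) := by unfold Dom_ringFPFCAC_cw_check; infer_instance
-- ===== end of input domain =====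

-- B rephrases A's cyclic 3-window (010/101) scan as a cyclic transition table plus
-- an adjacent-transitions check (alternative decomposition, same cost).


-- ===== PORT A =====
-- xs[k] with possibly negative k: Python raises only outside [-len, len), excluded by Pre_.
def ringFPFCAC_cw_check (cw_tuple : List Int) : Bool :=
  (List.range cw_tuple.length).foldl (fun (is_sat : Bool) (idx_i : Nat) =>
    let a := (PySem.List.pyGet? cw_tuple ((idx_i : Int) - 2)).getD 0
    let b := (PySem.List.pyGet? cw_tuple ((idx_i : Int) - 1)).getD 0
    let c := (PySem.List.pyGet? cw_tuple (idx_i : Int)).getD 0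
    let is_sat := if a = 0 ∧ b = 1 ∧ c = 0 then false else is_sat
    if a = 1 ∧ b = 0 ∧ c = 1 then false else is_sat) true

-- ===== PORT B =====
def ringFPFCAC_cw_check_alt (cw_tuple : List Int) : Bool :=
  let n := cw_tuple.length
  let trans := (List.range n).map (fun (j : Nat) =>
    decide ((PySem.List.pyGet? cw_tuple ((j : Int) - 1)).getD 0 ≠
            (PySem.List.pyGet? cw_tuple (j : Int)).getD 0))
  !((List.range n).any (fun (j : Nat) =>
      ((PySem.List.pyGet? trans ((j : Int) - 1)).getD false) &&
      ((PySem.List.pyGet? trans (j : Int)).getD false)))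

-- ===== PRECONDITION & SPEC =====
-- A raises IndexError when the tuple has fewer than 2 elements and AssertionError
-- when some element is not 0/1; exactly those inputs are excluded.
def Pre_ringFPFCAC_cw_check (cw_tuple : List Int) : Prop :=
  2 ≤ cw_tuple.length ∧ ∀ x ∈ cw_tuple, x = 0 ∨ x = 1
instance (cw_tuple : List Int) : Decidable (Pre_ringFPFCAC_cw_check cw_tuple) := by
  unfold Pre_ringFPFCAC_cw_check; infer_instance
def pvWitness_ringFPFCAC_cw_check : List Int := [0, 1, 1, 0]

def Spec_ringFPFCAC_cw_check (cw_tuple : List Int) (out : Bool) : Prop := out = ringFPFCAC_cw_check_alt cw_tuple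
instance (cw_tuple : List Int) (out : Bool) : Decidable (Spec_ringFPFCAC_cw_check cw_tuple out) := by unfold Spec_ringFPFCAC_cw_check; infer_instance

-- ===== CLAIM (what is proved, stated in full; the proofs are below) =====
def Claim_equal_ringFPFCAC_cw_check : Prop := ∀ (cw_tuple : List Int), Dom_ringFPFCAC_cw_check cw_tuple → Pre_ringFPFCAC_cw_check cw_tuple → Spec_ringFPFCAC_cw_check cw_tuple (ringFPFCAC_cw_check cw_tuple)

-- ===== LEMMAS AND PROOFS =====

-- cyclic element read, as both ports perform it
def pvGv (cw : List Int) (k : Int) : Int := (PySem.List.pyGet? cw k).getD 0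

-- A's window predicate at index i
def pvBadA (cw : List Int) (i : Nat) : Bool :=
  (pvGv cw (i - 2) == 0 && pvGv cw (i - 1) == 1 && pvGv cw i == 0) ||
  (pvGv cw (i - 2) == 1 && pvGv cw (i - 1) == 0 && pvGv cw i == 1)

lemma foldl_flag (g : Nat → Bool) (l : List Nat) (b : Bool) :
    l.foldl (fun s i => s && g i) b = (b && l.all g) := by
  induction l generalizing b with
  | nil => simp
  | cons x xs ih => simp [List.foldl_cons, ih, Bool.and_assoc]

lemma A_char (cw : List Int) :
    ringFPFCAC_cw_check cw =
      (List.range cw.length).all (fun i => !(pvBadA cw i)) := by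
  unfold ringFPFCAC_cw_check
  rw [show (fun (is_sat : Bool) (idx_i : Nat) =>
      let a := (PySem.List.pyGet? cw ((idx_i : Int) - 2)).getD 0
      let b := (PySem.List.pyGet? cw ((idx_i : Int) - 1)).getD 0
      let c := (PySem.List.pyGet? cw (idx_i : Int)).getD 0
      let is_sat := if a = 0 ∧ b = 1 ∧ c = 0 then false else is_sat
      if a = 1 ∧ b = 0 ∧ c = 1 then false else is_sat) =
      (fun s i => s && !(pvBadA cw i)) from ?_, foldl_flag]
  · simp
  · funext s i
    simp only [pvBadA, pvGv]
    split_ifs <;> simp_all <;> tauto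


lemma gv_mem (cw : List Int) (k : Int) (h1 : -(cw.length : Int) ≤ k) (h2 : k < cw.length) :
    pvGv cw k ∈ cw := by
  unfold pvGv
  cases hx : PySem.List.pyGet? cw k with
  | none =>
    rw [PySem.List.pyGet?_eq_none_iff] at hx
    exact absurd ⟨h1, h2⟩ hx
  | some x => simpa using PySem.List.mem_of_pyGet?_eq_some cw hx

-- the transition list B builds
def pvTrans (cw : List Int) : List Bool :=
  (List.range cw.length).map (fun (j : Nat) =>
    decide ((PySem.List.pyGet? cw ((j : Int) - 1)).getD 0 ≠
            (PySem.List.pyGet? cw (j : Int)).getD 0))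

lemma trans_get (cw : List Int) (j : Nat) (hj : j < cw.length) :
    (PySem.List.pyGet? (pvTrans cw) (j : Int)).getD false =
      decide (pvGv cw ((j : Int) - 1) ≠ pvGv cw (j : Int)) := by
  simp [pvTrans, hj, pvGv]

lemma trans_get_prev (cw : List Int) (j : Nat) (hj : j < cw.length)
    (hn : 2 ≤ cw.length) :
    (PySem.List.pyGet? (pvTrans cw) ((j : Int) - 1)).getD false =
      decide (pvGv cw ((j : Int) - 2) ≠ pvGv cw ((j : Int) - 1)) := by
  have hlen : (pvTrans cw).length = cw.length := by simp [pvTrans]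
  rcases Nat.eq_zero_or_pos j with rfl | hpos
  · -- j = 0: trans[-1] is the last transition; cw[-2], cw[-1] read the last two bits
    have hL : ((0:Nat) : Int) - 1 = (-1 : Int) := by norm_num
    rw [hL, PySem.List.pyGet?_neg_one, List.getLast?_eq_getElem?, hlen]
    have hlt : cw.length - 1 < cw.length := by omega
    simp only [pvTrans, List.getElem?_map, List.getElem?_range, hlt, Option.map_some]
    have e1 : ((cw.length - 1 : Nat) : Int) - 1 = ((cw.length - 2 : Nat) : Int) := by omega
    have e2 : ((0:Nat) : Int) - 2 = -2 := by norm_num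
    have e3 : ((0:Nat) : Int) - 1 = -1 := by norm_num
    have g1 : pvGv cw ((cw.length - 1 : Nat) : Int) = pvGv cw (-1) := by
      rw [pvGv, pvGv, PySem.List.pyGet?_neg_one, List.getLast?_eq_getElem?,
        PySem.List.pyGet?_natCast]
    have g2 : pvGv cw ((cw.length - 2 : Nat) : Int) = pvGv cw (-2) := by
      rw [pvGv, pvGv, PySem.List.pyGet?_neg_ofNat cw 2 (by omega) hn,
        PySem.List.pyGet?_natCast]
    simp only [e1, e2, ← g1, ← g2]
    simp [pvGv]
  · -- j ≥ 1: an ordinary lookup at j - 1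
    have e : ((j : Int) - 1) = ((j - 1 : Nat) : Int) := by omega
    have hj1 : j - 1 < cw.length := by omega
    rw [e, trans_get cw (j - 1) hj1]
    have e2 : ((j - 1 : Nat) : Int) - 1 = (j : Int) - 2 := by omega
    rw [e2, ← e]

lemma B_char (cw : List Int) :
    ringFPFCAC_cw_check_alt cw =
      !((List.range cw.length).any (fun (j : Nat) =>
        ((PySem.List.pyGet? (pvTrans cw) ((j : Int) - 1)).getD false) &&
        ((PySem.List.pyGet? (pvTrans cw) (j : Int)).getD false))) := rfl

lemma key (cw : List Int) (hpre : Pre_ringFPFCAC_cw_check cw) (i : Nat)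
    (hi : i < cw.length) :
    pvBadA cw i =
      (((PySem.List.pyGet? (pvTrans cw) ((i : Int) - 1)).getD false) &&
       ((PySem.List.pyGet? (pvTrans cw) (i : Int)).getD false)) := by
  obtain ⟨hn, hbin⟩ := hpre
  rw [trans_get cw i hi, trans_get_prev cw i hi hn]
  have hrange : ∀ k : Int, -(cw.length : Int) ≤ k → k < cw.length →
      pvGv cw k = 0 ∨ pvGv cw k = 1 := fun k h1 h2 => hbin _ (gv_mem cw k h1 h2)
  have ha := hrange ((i : Int) - 2) (by omega) (by omega)
  have hb := hrange ((i : Int) - 1) (by omega) (by omega)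
  have hc := hrange (i : Int) (by omega) (by omega)
  rcases ha with ha | ha <;> rcases hb with hb | hb <;> rcases hc with hc | hc <;>
    simp [pvBadA, ha, hb, hc]

-- ===== VERDICT (by name: the statement is the Claim_ definition above) =====
theorem ringFPFCAC_cw_check_spec : Claim_equal_ringFPFCAC_cw_check := by
  intro cw _hdom hpre
  unfold Spec_ringFPFCAC_cw_check
  rw [A_char, B_char, ← List.not_any_eq_all_not]
  congr 1
  rw [Bool.eq_iff_iff]
  simp only [List.any_eq_true, List.mem_range]
  constructor
  · rintro ⟨i, hi, hb⟩
    exact ⟨i, hi, by rw [← key cw hpre i hi]; exact hb⟩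
  · rintro ⟨i, hi, hb⟩
    exact ⟨i, hi, by rw [key cw hpre i hi]; exact hb⟩
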